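-- pv_equiv track=rewrite | github.com/nelsonchacko98/files_to_git | GetTextFromBoundingBox/extractemail_findname.py | find_names_from_dict
-- ===== SOURCE A (Python) =====
-- def unique(list1):
--
--     # intilize a null list
--     unique_list = []
--
--     # traverse for all elements
--     for x in list1:
--         # check if exists in unique_list or not
--         if x not in unique_list:
--             unique_list.append(x)
--
--     return unique_list
--
-- def find_names_from_dict(name_dict) :
--     ls = []
--     for key in name_dict :
--         ls.append(key)
--         for val in name_dict[key] :
--             ls.append(val)
--     unique_list= unique(ls)
--
--     final_name = ' '.join(unique_list).upper()
--     return final_name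
-- ===== SOURCE B (Python) =====
-- def find_names_from_dict(name_dict):
--     result = []
--     seen = set()
--     for key in name_dict:
--         if key not in seen:
--             seen.add(key)
--             result.append(key)
--         for val in name_dict[key]:
--             if val not in seen:
--                 seen.add(val)
--                 result.append(val)
--     return ' '.join(result).upper()
-- ===== Notes on version B (the rewrite author's own statement) =====
-- stated objective: faster
-- what changed: Fuses A's two phases (build the full duplicate-bearing list, then a quadratic unique() rescan) into a single traversal of the dict that appends each string at most once, tracked by a seen set; the intermediate list and the helper disappear.
import Mathlib
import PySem

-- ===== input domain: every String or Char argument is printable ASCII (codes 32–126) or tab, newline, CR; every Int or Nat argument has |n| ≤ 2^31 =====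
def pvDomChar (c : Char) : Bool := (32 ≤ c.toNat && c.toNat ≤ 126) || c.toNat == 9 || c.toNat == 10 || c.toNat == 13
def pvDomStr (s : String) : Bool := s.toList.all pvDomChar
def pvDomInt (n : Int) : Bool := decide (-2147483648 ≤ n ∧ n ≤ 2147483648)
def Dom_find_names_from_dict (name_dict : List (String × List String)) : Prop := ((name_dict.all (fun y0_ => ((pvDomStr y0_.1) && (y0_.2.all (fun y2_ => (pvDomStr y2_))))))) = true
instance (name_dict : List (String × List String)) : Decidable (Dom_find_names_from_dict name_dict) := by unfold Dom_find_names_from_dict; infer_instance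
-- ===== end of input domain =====

-- ===== PORT A =====
-- B fuses A's build-then-dedup phases into one pass with a seen set; return values proved equal.
def pvUnique (list1 : List String) : List String :=
  list1.foldl (fun u x => if u.contains x then u else u ++ [x]) []

def find_names_from_dict (name_dict : List (String × List String)) : String :=
  let ls := name_dict.foldl (fun acc p => p.2.foldl (fun a v => a ++ [v]) (acc ++ [p.1])) []
  PySem.Str.upper (PySem.Str.join " " (pvUnique ls))

-- ===== PORT B =====
def pvStep (st : List String × PySem.Set String) (x : String) : List String × PySem.Set String :=
  if PySem.Set.contains st.2 x then st else (st.1 ++ [x], PySem.Set.add st.2 x)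

def find_names_from_dict_alt (name_dict : List (String × List String)) : String :=
  let st := name_dict.foldl (fun st p => p.2.foldl pvStep (pvStep st p.1)) ([], PySem.Set.empty)
  PySem.Str.upper (PySem.Str.join " " st.1)

-- ===== PRECONDITION & SPEC =====
def Spec_find_names_from_dict (name_dict : List (String × List String)) (out : String) : Prop := out = find_names_from_dict_alt name_dict
instance (name_dict : List (String × List String)) (out : String) : Decidable (Spec_find_names_from_dict name_dict out) := by unfold Spec_find_names_from_dict; infer_instance

-- ===== CLAIM (what is proved, stated in full; the proofs are below) =====
def Claim_equal_find_names_from_dict : Prop := ∀ (name_dict : List (String × List String)), Dom_find_names_from_dict name_dict → Spec_find_names_from_dict name_dict (find_names_from_dict name_dict)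

-- ===== LEMMAS AND PROOFS =====

def pvUStep (u : List String) (x : String) : List String :=
  if u.contains x then u else u ++ [x]

def pvFlat (nd : List (String × List String)) : List String :=
  nd.flatMap (fun p => p.1 :: p.2)

theorem pvStep_diag (u : List String) (x : String) :
    pvStep (u, u) x = (pvUStep u x, pvUStep u x) := by
  simp only [pvStep, pvUStep, PySem.Set.contains, PySem.Set.add]
  split <;> rfl

theorem foldl_pvStep_diag (vs : List String) (u : List String) :
    vs.foldl pvStep (u, u) = (vs.foldl pvUStep u, vs.foldl pvUStep u) := by
  induction vs generalizing u with
  | nil => rfl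
  | cons v vs ih => simp [List.foldl_cons, pvStep_diag, ih]

theorem foldl_fused_diag (nd : List (String × List String)) (u : List String) :
    nd.foldl (fun st p => p.2.foldl pvStep (pvStep st p.1)) (u, u)
      = ((pvFlat nd).foldl pvUStep u, (pvFlat nd).foldl pvUStep u) := by
  induction nd generalizing u with
  | nil => rfl
  | cons p nd ih =>
      simp only [List.foldl_cons, pvStep_diag, foldl_pvStep_diag, ih, pvFlat,
        List.flatMap_cons, List.foldl_append]

theorem foldl_snoc (vs : List String) (a : List String) :
    vs.foldl (fun a v => a ++ [v]) a = a ++ vs := by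
  induction vs generalizing a with
  | nil => simp
  | cons v vs ih => simp [List.foldl_cons, ih]

theorem ls_eq_flat (nd : List (String × List String)) (acc : List String) :
    nd.foldl (fun acc p => p.2.foldl (fun a v => a ++ [v]) (acc ++ [p.1])) acc
      = acc ++ pvFlat nd := by
  induction nd generalizing acc with
  | nil => simp [pvFlat]
  | cons p nd ih =>
      rw [List.foldl_cons, foldl_snoc, ih]
      simp [pvFlat, List.flatMap_cons]

theorem pvUnique_eq_foldl (l : List String) : pvUnique l = l.foldl pvUStep [] := rfl

-- ===== VERDICT (by name: the statement is the Claim_ definition above) =====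
theorem find_names_from_dict_spec : Claim_equal_find_names_from_dict := by
  intro nd _
  show find_names_from_dict nd = find_names_from_dict_alt nd
  simp only [find_names_from_dict, find_names_from_dict_alt, PySem.Set.empty,
    foldl_fused_diag, ls_eq_flat, pvUnique_eq_foldl, List.nil_append]
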